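-- pv_equiv track=rewrite | github.com/lcmsschoolministry-ops/nlsa-data-analysis | app.py | aggregate_chunk_outputs
-- ===== SOURCE A (Python) =====
-- from typing import List, Dict, Any
--
-- NLSA_DOMAINS = [
--     "School Purpose & Mission Alignment",
--     "Relationships",
--     "Leadership",
--     "Professional Personnel",
--     "Teaching & Learning",
--     "Student Services",
--     "Faith Integration",
--     "Operational Vitality",
-- ]
--
-- def empty_domain_dict():
--     return {
--         "evidence": [],
--         "strengths": [],
--         "growth_areas": [],
--         "risks_or_noncompliance": []
--     }
--
-- def merge_domain_dict(a: Dict[str, List[str]], b: Dict[str, List[str]]) -> Dict[str, List[str]]: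
--     out = {
--         k: list(dict.fromkeys((a.get(k, []) + b.get(k, []))))  # preserve order, dedupe
--         for k in ["evidence", "strengths", "growth_areas", "risks_or_noncompliance"]
--     }
--     return out
--
-- def aggregate_chunk_outputs(chunk_jsons: List[Dict[str, Any]], per_list_cap: int = 8) -> Dict[str, Dict[str, List[str]]]:
--     agg = {d: empty_domain_dict() for d in NLSA_DOMAINS}
--     for j in chunk_jsons:
--         if not j or "domains" not in j:
--             continue
--         for domain, content in j["domains"].items():
--             if domain not in agg:
--                 continue
--             agg[domain] = merge_domain_dict(agg[domain], {
--                 "evidence": content.get("evidence", []),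
--                 "strengths": content.get("strengths", []),
--                 "growth_areas": content.get("growth_areas", []),
--                 "risks_or_noncompliance": content.get("risks_or_noncompliance", []),
--             })
--     # Trim hard to keep synthesis fast
--     for d in agg:
--         for k in agg[d]:
--             agg[d][k] = agg[d][k][:per_list_cap]
--     return agg
-- ===== SOURCE B (Python) =====
-- from typing import List, Dict, Any
--
-- NLSA_DOMAINS = [
--     "School Purpose & Mission Alignment",
--     "Relationships",
--     "Leadership",
--     "Professional Personnel",
--     "Teaching & Learning",
--     "Student Services",
--     "Faith Integration",
--     "Operational Vitality",
-- ]
--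
-- _KEYS = ["evidence", "strengths", "growth_areas", "risks_or_noncompliance"]
--
-- def aggregate_chunk_outputs(chunk_jsons: List[Dict[str, Any]], per_list_cap: int = 8) -> Dict[str, Dict[str, List[str]]]:
--     # Stateless, output-directed build: pull out the valid 'domains' dicts once,
--     # then for each (domain, key) cell compute its final list directly from the
--     # flattened stream of matching items — no mutable aggregate, no pairwise merge.
--     valid = [j["domains"] for j in chunk_jsons if j and "domains" in j]
--     return {
--         d: {
--             k: list(dict.fromkeys(
--                 x
--                 for doms in valid
--                 for dom, content in doms.items()
--                 if dom == d
--                 for x in content.get(k, [])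
--             ))[:per_list_cap]
--             for k in _KEYS
--         }
--         for d in NLSA_DOMAINS
--     }
-- ===== Notes on version B (the rewrite author's own statement) =====
-- stated objective: alternative
-- what changed: Replaces A's stateful chunk-by-chunk dict mutation with repeated dedup-merges (merge_domain_dict) by a stateless, output-directed comprehension: extract the valid 'domains' dicts once, then build each (domain, key) cell directly by flattening the matching items across all chunks and deduping+capping once.
import Mathlib
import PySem

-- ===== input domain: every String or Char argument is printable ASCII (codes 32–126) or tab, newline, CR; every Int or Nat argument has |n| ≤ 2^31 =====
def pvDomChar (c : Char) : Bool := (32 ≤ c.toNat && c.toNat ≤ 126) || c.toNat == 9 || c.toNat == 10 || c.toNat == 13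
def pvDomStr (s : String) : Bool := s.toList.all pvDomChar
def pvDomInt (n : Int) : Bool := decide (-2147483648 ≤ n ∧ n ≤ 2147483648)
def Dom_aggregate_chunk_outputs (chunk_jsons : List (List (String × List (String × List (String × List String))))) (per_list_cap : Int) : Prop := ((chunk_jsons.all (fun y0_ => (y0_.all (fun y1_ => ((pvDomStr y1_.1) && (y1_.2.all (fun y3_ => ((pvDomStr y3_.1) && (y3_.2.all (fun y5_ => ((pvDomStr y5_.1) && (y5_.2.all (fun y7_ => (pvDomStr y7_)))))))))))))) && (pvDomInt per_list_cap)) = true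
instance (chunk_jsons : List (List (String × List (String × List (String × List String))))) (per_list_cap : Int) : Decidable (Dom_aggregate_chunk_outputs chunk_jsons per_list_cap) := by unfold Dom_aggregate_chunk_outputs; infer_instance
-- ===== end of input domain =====

-- B replaces A's stateful chunk-by-chunk dict mutation with repeated dedup-merges by a
-- stateless, output-directed comprehension that builds each (domain, key) cell directly
-- from the flattened stream of matching items (objective: alternative decomposition).

-- ===== PORT A =====

def NLSA_DOMAINS : List String :=
  ["School Purpose & Mission Alignment", "Relationships", "Leadership",
   "Professional Personnel", "Teaching & Learning", "Student Services",
   "Faith Integration", "Operational Vitality"]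

def MERGE_KEYS : List String :=
  ["evidence", "strengths", "growth_areas", "risks_or_noncompliance"]

def empty_domain_dict : PySem.Dict String (List String) :=
  PySem.Dict.ofList (MERGE_KEYS.map (fun k => (k, ([] : List String))))

-- merge_domain_dict: dict comprehension over the four keys, dedup preserving order
def merge_domain_dict (a b : PySem.Dict String (List String)) : PySem.Dict String (List String) :=
  PySem.Dict.ofList (MERGE_KEYS.map (fun k => (k, PySem.List.dedup (a.getD k [] ++ b.getD k []))))

-- body of the inner for-loop of A (one (domain, content) item)
def aggStepA (agg : PySem.Dict String (PySem.Dict String (List String)))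
    (dc : String × List (String × List String)) :
    PySem.Dict String (PySem.Dict String (List String)) :=
  match agg.get? dc.1 with
  | none => agg          -- 'if domain not in agg: continue'
  | some cur =>
      agg.insert dc.1 (merge_domain_dict cur
        (PySem.Dict.ofList (MERGE_KEYS.map
          (fun k => (k, (PySem.Dict.mk dc.2).getD k [])))))

-- body of the outer for-loop of A (one chunk j)
def chunkStepA (agg : PySem.Dict String (PySem.Dict String (List String)))
    (j : List (String × List (String × List (String × List String)))) :
    PySem.Dict String (PySem.Dict String (List String)) :=
  if j = [] ∨ ¬ (PySem.Dict.mk j).contains "domains" then agg   -- 'if not j or "domains" not in j: continue'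
  else match (PySem.Dict.mk j).get? "domains" with
    | none => agg                                               -- unreachable (contains holds)
    | some doms => doms.foldl aggStepA agg

def aggregate_chunk_outputs (chunk_jsons : List (List (String × List (String × List (String × List String))))) (per_list_cap : Int) : List (String × List (String × List String)) :=
  -- agg = {d: empty_domain_dict() for d in NLSA_DOMAINS}; then the chunk loop; then the
  -- trim loop: every key of every inner dict is overwritten in place with its [:per_list_cap]
  -- slice; overwriting every existing key in place = mapping over the items lists.
  List.map
    (fun p => (p.1,
      p.2.items.map (fun q => (q.1, PySem.List.slice q.2 none (some per_list_cap)))))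
    (List.foldl chunkStepA
      (PySem.Dict.ofList (NLSA_DOMAINS.map (fun d => (d, empty_domain_dict))))
      chunk_jsons).items

-- ===== PORT B =====

-- '[j["domains"] for j in chunk_jsons if j and "domains" in j]'
def validDomains (chunk_jsons : List (List (String × List (String × List (String × List String))))) :
    List (List (String × List (String × List String))) :=
  chunk_jsons.filterMap (fun j =>
    if !j.isEmpty && (PySem.Dict.mk j).contains "domains"
    then (PySem.Dict.mk j).get? "domains" else none)

-- the generator feeding dict.fromkeys for one (domain, key) cell
def cellStream (valid : List (List (String × List (String × List String)))) (d k : String) :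
    List String :=
  valid.flatMap (fun doms =>
    doms.flatMap (fun dc =>
      if dc.1 == d then (PySem.Dict.mk dc.2).getD k [] else []))

def aggregate_chunk_outputs_alt (chunk_jsons : List (List (String × List (String × List (String × List String))))) (per_list_cap : Int) : List (String × List (String × List String)) :=
  -- stateless nested comprehension over the fixed domain/key grids
  NLSA_DOMAINS.map (fun d =>
    (d, MERGE_KEYS.map (fun k =>
      (k, PySem.List.slice
            (PySem.List.dedup (cellStream (validDomains chunk_jsons) d k))
            none (some per_list_cap)))))

-- ===== PRECONDITION & SPEC =====
def Spec_aggregate_chunk_outputs (chunk_jsons : List (List (String × List (String × List (String × List String))))) (per_list_cap : Int) (out : List (String × List (String × List String))) : Prop := out = aggregate_chunk_outputs_alt chunk_jsons per_list_cap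
instance (chunk_jsons : List (List (String × List (String × List (String × List String))))) (per_list_cap : Int) (out : List (String × List (String × List String))) : Decidable (Spec_aggregate_chunk_outputs chunk_jsons per_list_cap out) := by unfold Spec_aggregate_chunk_outputs; infer_instance

-- ===== CLAIM (what is proved, stated in full; the proofs are below) =====
def Claim_equal_aggregate_chunk_outputs : Prop := ∀ (chunk_jsons : List (List (String × List (String × List (String × List String))))) (per_list_cap : Int), Dom_aggregate_chunk_outputs chunk_jsons per_list_cap → Spec_aggregate_chunk_outputs chunk_jsons per_list_cap (aggregate_chunk_outputs chunk_jsons per_list_cap)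

-- ===== LEMMAS AND PROOFS =====

-- A's aggregate state, characterised by the raw (pre-dedup) list at each (domain, key) cell
def innerOf (r : String → List String) : PySem.Dict String (List String) :=
  PySem.Dict.mk (MERGE_KEYS.map (fun k => (k, PySem.List.dedup (r k))))

def stateOf (R : String → String → List String) :
    PySem.Dict String (PySem.Dict String (List String)) :=
  PySem.Dict.mk (NLSA_DOMAINS.map (fun d => (d, innerOf (R d))))

-- raw contribution of one 'domains' dict to cell (d, k)
def domsRaw (doms : List (String × List (String × List String))) (d k : String) : List String :=
  doms.flatMap (fun dc => if dc.1 == d then (PySem.Dict.mk dc.2).getD k [] else [])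

theorem dedup_dedup_append (a b : List String) :
    PySem.List.dedup (PySem.List.dedup a ++ b) = PySem.List.dedup (a ++ b) := by
  simp [PySem.List.dedup_eq_ofList, PySem.Set.ofList_append, PySem.Set.ofList_ofList]

theorem stateOf_congr (R R' : String → String → List String)
    (h : ∀ d ∈ NLSA_DOMAINS, ∀ k, R d k = R' d k) : stateOf R = stateOf R' := by
  unfold stateOf
  rw [PySem.Dict.ext_iff]
  show List.map (fun d => (d, innerOf (R d))) NLSA_DOMAINS
      = List.map (fun d => (d, innerOf (R' d))) NLSA_DOMAINS
  refine List.map_congr_left (fun d hd => ?_)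
  unfold innerOf
  refine Prod.ext rfl ?_
  rw [PySem.Dict.ext_iff]
  show List.map (fun k => (k, PySem.List.dedup (R d k))) MERGE_KEYS
      = List.map (fun k => (k, PySem.List.dedup (R' d k))) MERGE_KEYS
  exact List.map_congr_left (fun k _ => by rw [h d hd])

theorem merge_inner (r : String → List String) (c : PySem.Dict String (List String)) :
    merge_domain_dict (innerOf r)
      (PySem.Dict.ofList (MERGE_KEYS.map (fun k => (k, c.getD k []))))
      = innerOf (fun k => r k ++ c.getD k []) := by
  show PySem.Dict.mk
    [("evidence", PySem.List.dedup (PySem.List.dedup (r "evidence") ++ c.getD "evidence" [])),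
     ("strengths", PySem.List.dedup (PySem.List.dedup (r "strengths") ++ c.getD "strengths" [])),
     ("growth_areas", PySem.List.dedup (PySem.List.dedup (r "growth_areas") ++ c.getD "growth_areas" [])),
     ("risks_or_noncompliance", PySem.List.dedup (PySem.List.dedup (r "risks_or_noncompliance") ++ c.getD "risks_or_noncompliance" []))] = _
  simp only [dedup_dedup_append]
  rfl

theorem aggStepA_stateOf (R : String → String → List String)
    (dc : String × List (String × List String)) :
    aggStepA (stateOf R) dc
      = stateOf (fun d k => if dc.1 = d then R d k ++ (PySem.Dict.mk dc.2).getD k [] else R d k) := by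
  obtain ⟨dom, c⟩ := dc
  by_cases h0 : dom = "School Purpose & Mission Alignment"
  · subst h0
    show PySem.Dict.insert _ _ _ = _
    rw [merge_inner]
    unfold stateOf NLSA_DOMAINS
    rw [PySem.Dict.ext_iff, PySem.Dict.items_insert_of_contains]
    · simp
    · rfl
  by_cases h1 : dom = "Relationships"
  · subst h1
    show PySem.Dict.insert _ _ _ = _
    rw [merge_inner]
    unfold stateOf NLSA_DOMAINS
    rw [PySem.Dict.ext_iff, PySem.Dict.items_insert_of_contains]
    · simp
    · rfl
  by_cases h2 : dom = "Leadership"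
  · subst h2
    show PySem.Dict.insert _ _ _ = _
    rw [merge_inner]
    unfold stateOf NLSA_DOMAINS
    rw [PySem.Dict.ext_iff, PySem.Dict.items_insert_of_contains]
    · simp
    · rfl
  by_cases h3 : dom = "Professional Personnel"
  · subst h3
    show PySem.Dict.insert _ _ _ = _
    rw [merge_inner]
    unfold stateOf NLSA_DOMAINS
    rw [PySem.Dict.ext_iff, PySem.Dict.items_insert_of_contains]
    · simp
    · rfl
  by_cases h4 : dom = "Teaching & Learning"
  · subst h4
    show PySem.Dict.insert _ _ _ = _
    rw [merge_inner]
    unfold stateOf NLSA_DOMAINS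
    rw [PySem.Dict.ext_iff, PySem.Dict.items_insert_of_contains]
    · simp
    · rfl
  by_cases h5 : dom = "Student Services"
  · subst h5
    show PySem.Dict.insert _ _ _ = _
    rw [merge_inner]
    unfold stateOf NLSA_DOMAINS
    rw [PySem.Dict.ext_iff, PySem.Dict.items_insert_of_contains]
    · simp
    · rfl
  by_cases h6 : dom = "Faith Integration"
  · subst h6
    show PySem.Dict.insert _ _ _ = _
    rw [merge_inner]
    unfold stateOf NLSA_DOMAINS
    rw [PySem.Dict.ext_iff, PySem.Dict.items_insert_of_contains]
    · simp
    · rfl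
  by_cases h7 : dom = "Operational Vitality"
  · subst h7
    show PySem.Dict.insert _ _ _ = _
    rw [merge_inner]
    unfold stateOf NLSA_DOMAINS
    rw [PySem.Dict.ext_iff, PySem.Dict.items_insert_of_contains]
    · simp
    · rfl
  -- dom is none of the NLSA domains: A skips the item, and the update touches no tracked cell
  have g : (stateOf R).get? dom = none := by
    simp [stateOf, NLSA_DOMAINS, PySem.Dict.get?, beq_iff_eq,
      Ne.symm h0, Ne.symm h1, Ne.symm h2, Ne.symm h3, Ne.symm h4, Ne.symm h5, Ne.symm h6, Ne.symm h7]
  unfold aggStepA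
  rw [g]
  apply stateOf_congr
  intro d hd k
  fin_cases hd <;> simp [h0, h1, h2, h3, h4, h5, h6, h7]

theorem foldl_aggStepA_stateOf (doms : List (String × List (String × List String)))
    (R : String → String → List String) :
    doms.foldl aggStepA (stateOf R)
      = stateOf (fun d k => R d k ++ domsRaw doms d k) := by
  induction doms generalizing R with
  | nil => exact stateOf_congr _ _ (fun d _ k => by simp [domsRaw])
  | cons dc t ih =>
      rw [List.foldl_cons, aggStepA_stateOf, ih]
      apply stateOf_congr
      intro d _ k
      simp only [domsRaw, List.flatMap_cons]
      by_cases h : dc.1 = d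
      · simp [h, List.append_assoc]
      · have : (dc.1 == d) = false := by simp [h]
        simp [h, this]

theorem foldl_chunkStepA (chunks : List (List (String × List (String × List (String × List String)))))
    (s : PySem.Dict String (PySem.Dict String (List String))) :
    chunks.foldl chunkStepA s
      = (validDomains chunks).foldl (fun s doms => doms.foldl aggStepA s) s := by
  induction chunks generalizing s with
  | nil => rfl
  | cons j t ih =>
      rw [List.foldl_cons]
      unfold chunkStepA validDomains
      simp only [List.filterMap_cons]
      by_cases hj : j = [] ∨ ¬ (PySem.Dict.mk j).contains "domains"
      · rw [if_pos hj]
        have hcond : (!j.isEmpty && (PySem.Dict.mk j).contains "domains") = false := by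
          rcases hj with h | h
          · simp [h]
          · simp [h]
        rw [hcond]
        exact ih s
      · rw [if_neg hj]
        rw [not_or, not_not] at hj
        have hcond : (!j.isEmpty && (PySem.Dict.mk j).contains "domains") = true := by
          simp [hj.2, hj.1]
        rw [hcond]
        have hsome : ((PySem.Dict.mk j).get? "domains").isSome := by
          rw [← PySem.Dict.contains_eq_isSome_get?]; exact hj.2
        cases hd : (PySem.Dict.mk j).get? "domains" with
        | none => rw [hd] at hsome; simp at hsome
        | some doms => exact ih _

theorem fold_stateOf
    (vs : List (List (String × List (String × List String))))
    (R : String → String → List String) :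
    vs.foldl (fun s doms => doms.foldl aggStepA s) (stateOf R)
      = stateOf (fun d k => R d k ++ cellStream vs d k) := by
  induction vs generalizing R with
  | nil => exact stateOf_congr _ _ (fun d _ k => by simp [cellStream])
  | cons doms t ih =>
      rw [List.foldl_cons, foldl_aggStepA_stateOf, ih]
      apply stateOf_congr
      intro d _ k
      simp [cellStream, domsRaw, List.append_assoc]

theorem aggregate_chunk_outputs_eq (chunk_jsons : List (List (String × List (String × List (String × List String))))) (per_list_cap : Int) :
    aggregate_chunk_outputs chunk_jsons per_list_cap
      = aggregate_chunk_outputs_alt chunk_jsons per_list_cap := by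
  unfold aggregate_chunk_outputs aggregate_chunk_outputs_alt
  have h0 : PySem.Dict.ofList (NLSA_DOMAINS.map (fun d => (d, empty_domain_dict)))
      = stateOf (fun _ _ => []) := by rfl
  rw [h0, foldl_chunkStepA, fold_stateOf]
  simp only [stateOf, innerOf, List.map_map, Function.comp_def]
  rfl

-- ===== VERDICT (by name: the statement is the Claim_ definition above) =====
theorem aggregate_chunk_outputs_spec : Claim_equal_aggregate_chunk_outputs := by
  intro chunk_jsons per_list_cap _
  exact aggregate_chunk_outputs_eq chunk_jsons per_list_cap
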